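-- pv_equiv track=rewrite | github.com/UsmanJafri/Leo | iisy/worst-case-feature-table.py | special_example_split_largest_into_halves
-- ===== SOURCE A (Python) =====
-- def special_example_split_largest_into_halves(lower, upper, num_splits):
-- 	if num_splits < 1:
-- 		return None
--
-- 	config = [(lower, lower), (1, upper)]
-- 	for s in range(num_splits - 1):
-- 		max_split_ind = -1
-- 		max_split = -1
-- 		for i in range(len(config)):
-- 			size = config[i][1] - config[i][0]
-- 			if size > max_split:
-- 				max_split_ind = i
-- 				max_split = size
--
-- 		max_split = int(max_split / 2)
--
-- 		max_split_upper = config[max_split_ind][1]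
-- 		config[max_split_ind] = (config[max_split_ind][0], config[max_split_ind][0] + max_split)
-- 		new_split = (config[max_split_ind][1] + 1, max_split_upper)
-- 		config.insert(max_split_ind + 1, new_split)
--
-- 	return config
-- ===== SOURCE B (Python) =====
-- def _key_lt(x, y):
--     # priority order: larger size first (stored negated), then leftmost position (path string)
--     return x[0] < y[0] or (x[0] == y[0] and x[1] < y[1])
--
--
-- def _push(queue, item):
--     i = 0
--     while i < len(queue) and _key_lt(queue[i], item):
--         i += 1
--     queue.insert(i, item)
--
--
-- def special_example_split_largest_into_halves(lower, upper, num_splits):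
--     if num_splits < 1:
--         return None
--     # priority queue (kept sorted ascending by (-size, path)); path is the binary
--     # tree-position string of the interval, so lexicographic path order is the
--     # left-to-right order of the intervals.
--     queue = []
--     _push(queue, (0, "0", lower, lower))
--     _push(queue, (1 - upper, "1", 1, upper))
--     for _ in range(num_splits - 1):
--         negsz, path, a, b = queue.pop(0)
--         mid = a + (-negsz) // 2
--         _push(queue, (a - mid, path + "0", a, mid))
--         _push(queue, (mid + 1 - b, path + "1", mid + 1, b))
--     return [(a, b) for _, _, a, b in sorted(queue, key=lambda e: e[1])]
-- ===== Notes on version B (the rewrite author's own statement) =====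
-- stated objective: alternative
-- what changed: A rescans the positional interval list for the largest interval each round and splits it in place; B maintains a priority queue ordered by (-size, tree-path), pops its front, pushes the two halves labelled with their binary tree paths, and finally sorts the leaves by path to recover left-to-right order.
import Mathlib
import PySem

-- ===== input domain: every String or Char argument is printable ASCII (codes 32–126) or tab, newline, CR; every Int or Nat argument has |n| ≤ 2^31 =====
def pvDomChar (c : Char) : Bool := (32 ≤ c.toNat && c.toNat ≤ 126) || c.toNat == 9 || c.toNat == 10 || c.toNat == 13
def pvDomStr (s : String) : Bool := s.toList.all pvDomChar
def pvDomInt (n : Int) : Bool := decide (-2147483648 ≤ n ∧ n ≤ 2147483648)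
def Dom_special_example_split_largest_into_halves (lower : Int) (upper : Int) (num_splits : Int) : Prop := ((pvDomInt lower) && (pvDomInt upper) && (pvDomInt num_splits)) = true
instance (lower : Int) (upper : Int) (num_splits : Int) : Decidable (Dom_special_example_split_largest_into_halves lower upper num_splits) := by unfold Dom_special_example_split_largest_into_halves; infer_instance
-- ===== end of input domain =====

-- B replaces A's per-round argmax rescan of the positional interval list by a priority queue
-- keyed by (-size, tree-path) with a final sort of the leaves by path; same return value, different algorithm.

-- ===== PORT A =====
def pvStepA (config : List (Int × Int)) : List (Int × Int) :=
  let scan := (PySem.List.pyRange 0 (config.length : Int) 1).foldl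
      (fun (acc : Int × Int) i =>
        let c := PySem.List.pyGetD config i (0, 0)
        if c.2 - c.1 > acc.2 then (i, c.2 - c.1) else acc) (-1, -1)
  let maxSplitInd := scan.1
  -- int(max_split / 2): float division is exact for |max_split| ≤ 2^32, int() truncates toward zero = Int.tdiv
  let half := Int.tdiv scan.2 2
  let cur := PySem.List.pyGetD config maxSplitInd (0, 0)
  let maxSplitUpper := cur.2
  let config1 := PySem.List.pySetD config maxSplitInd (cur.1, cur.1 + half)
  let cur1 := PySem.List.pyGetD config1 maxSplitInd (0, 0)
  PySem.List.insert config1 (maxSplitInd + 1) (cur1.2 + 1, maxSplitUpper)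

def special_example_split_largest_into_halves (lower : Int) (upper : Int) (num_splits : Int) : Option (List (Int × Int)) :=
  if num_splits < 1 then none
  else some ((PySem.List.pyRange 0 (num_splits - 1) 1).foldl
    (fun config _ => pvStepA config) [(lower, lower), (1, upper)])

-- ===== PORT B =====
-- the lexicographic order on path strings (sorted(..., key=...)), spelled via the LinearOrder instance
@[reducible] def pvPathLO : LinearOrder (List Char) := inferInstance
@[reducible] def pvPathLT : LT (List Char) := @Preorder.toLT _ (@PartialOrder.toPreorder _ (@LinearOrder.toPartialOrder _ pvPathLO))
@[reducible] def pvPathDec : DecidableLT (List Char) := @LinearOrder.toDecidableLT _ pvPathLO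

def pvKeyLt (x : Int × List Char) (y : Int × List Char) : Bool :=
  decide (x.1 < y.1) || (decide (x.1 = y.1) && decide (x.2 < y.2))

def pvPush (queue : List (Int × List Char × Int × Int)) (item : Int × List Char × Int × Int) :
    List (Int × List Char × Int × Int) :=
  match queue with
  | [] => [item]
  | q :: rest =>
      if pvKeyLt (q.1, q.2.1) (item.1, item.2.1) then q :: pvPush rest item
      else item :: q :: rest

def pvStepB (queue : List (Int × List Char × Int × Int)) : List (Int × List Char × Int × Int) :=
  match queue with
  | [] => []   -- unreachable: the queue always holds at least two items (queue.pop(0) never raises)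
  | (negsz, path, a, b) :: rest =>
      let mid := a + PySem.Int.floordiv (-negsz) 2
      pvPush (pvPush rest (a - mid, path ++ ['0'], a, mid)) (mid + 1 - b, path ++ ['1'], mid + 1, b)

def special_example_split_largest_into_halves_alt (lower : Int) (upper : Int) (num_splits : Int) : Option (List (Int × Int)) :=
  if num_splits < 1 then none
  else
    let q0 := pvPush (pvPush [] (0, ['0'], lower, lower)) (1 - upper, ['1'], 1, upper)
    let qf := (PySem.List.pyRange 0 (num_splits - 1) 1).foldl (fun q _ => pvStepB q) q0
    some ((@PySem.List.sorted _ (List Char) pvPathLT pvPathDec qf (fun e => e.2.1) false).map (fun e => (e.2.2.1, e.2.2.2)))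

-- ===== PRECONDITION & SPEC =====
def Spec_special_example_split_largest_into_halves (lower : Int) (upper : Int) (num_splits : Int) (out : Option (List (Int × Int))) : Prop := out = special_example_split_largest_into_halves_alt lower upper num_splits
instance (lower : Int) (upper : Int) (num_splits : Int) (out : Option (List (Int × Int))) : Decidable (Spec_special_example_split_largest_into_halves lower upper num_splits out) := by unfold Spec_special_example_split_largest_into_halves; infer_instance

-- ===== CLAIM (what is proved, stated in full; the proofs are below) =====
def Claim_equal_special_example_split_largest_into_halves : Prop := ∀ (lower : Int) (upper : Int) (num_splits : Int), Dom_special_example_split_largest_into_halves lower upper num_splits → Spec_special_example_split_largest_into_halves lower upper num_splits (special_example_split_largest_into_halves lower upper num_splits)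

-- ===== LEMMAS AND PROOFS =====

-- node = (tree path, lower, upper); proof-side helpers
abbrev pvN : Type := List Char × Int × Int

def pvSz (d : pvN) : Int := d.2.2 - d.2.1
def pvProj (d : pvN) : Int × Int := (d.2.1, d.2.2)
def pvDec (d : pvN) : Int × List Char × Int × Int := (d.2.1 - d.2.2, d.1, d.2.1, d.2.2)

def pvMax (D : List pvN) : Int := D.foldl (fun m d => max m (pvSz d)) (-1)
def pvIdx (D : List pvN) : Nat := D.findIdx (fun d => pvSz d == pvMax D)
def pvKids (d : pvN) : List pvN :=
  let h := PySem.Int.floordiv (pvSz d) 2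
  [(d.1 ++ ['0'], d.2.1, d.2.1 + h), (d.1 ++ ['1'], d.2.1 + h + 1, d.2.2)]
def pvRef (D : List pvN) : List pvN :=
  D.take (pvIdx D) ++ pvKids (D.getD (pvIdx D) ([], 0, 0)) ++ D.drop (pvIdx D + 1)

-- invariant: paths strictly lex-increasing and prefix-free, some interval of size ≥ 0
def pvR (x y : pvN) : Prop := x.1 < y.1 ∧ ¬ x.1 <+: y.1
def pvInv (D : List pvN) : Prop := D.Pairwise pvR ∧ ∃ d ∈ D, 0 ≤ pvSz d

def pvKLt (x y : Int × List Char × Int × Int) : Prop := pvKeyLt (x.1, x.2.1) (y.1, y.2.1) = true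
def pvCmp (x y : Int × List Char × Int × Int) : Prop := pvKLt x y ∨ pvKLt y x
def pvRel (D : List pvN) (q : List (Int × List Char × Int × Int)) : Prop :=
  q.Perm (D.map pvDec) ∧ q.Pairwise pvKLt

-- ---- generic lex/prefix facts on List Char ----
lemma pv_lt_append_right (s t u : List Char) (h : s < t) : s < t ++ u :=
  (List.lt_iff_lex_lt _ _).mpr (List.Lex.append_right _ u ((List.lt_iff_lex_lt _ _).mp h))

lemma pv_append_lt : ∀ (s t u : List Char), s < t → ¬ s <+: t → s ++ u < t := by
  intro s
  induction s with
  | nil => intro t u _ hp; exact absurd List.nil_prefix hp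
  | cons a s' ih =>
      intro t u h hp
      match t with
      | [] => exact absurd h (List.not_lt_nil _)
      | b :: t' =>
          rcases List.cons_lt_cons_iff.mp h with h1 | ⟨rfl, h2⟩
          · exact List.cons_lt_cons_iff.mpr (Or.inl h1)
          · have hp' : ¬ s' <+: t' := fun hq => hp (List.cons_prefix_cons.mpr ⟨rfl, hq⟩)
            exact List.cons_lt_cons_iff.mpr (Or.inr ⟨rfl, ih t' u h2 hp'⟩)

lemma pv_append_lt_append : ∀ (s : List Char), s ++ ['0'] < s ++ ['1'] := by
  intro s
  induction s with
  | nil => decide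
  | cons a s' ih => exact List.cons_lt_cons_iff.mpr (Or.inr ⟨rfl, ih⟩)

lemma pv_prefix_lt : ∀ (s t : List Char), s <+: t → s ≠ t → s < t := by
  intro s
  induction s with
  | nil =>
      intro t _ hne
      match t with
      | [] => exact absurd rfl hne
      | c :: t' => exact List.nil_lt_cons c t'
  | cons a s' ih =>
      intro t h hne
      match t with
      | [] => exact absurd (List.prefix_nil.mp h) (by simp)
      | b :: t' =>
          rcases List.cons_prefix_cons.mp h with ⟨rfl, hq⟩
          have hne' : s' ≠ t' := fun he => hne (by rw [he])
          exact List.cons_lt_cons_iff.mpr (Or.inr ⟨rfl, ih t' hq hne'⟩)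

lemma pv_not_prefix_append (s t u : List Char) (h : s < t) (hp : ¬ s <+: t) : ¬ s <+: t ++ u := by
  intro hpre
  by_cases hl : s.length ≤ t.length
  · exact hp (List.prefix_of_prefix_length_le hpre (List.prefix_append t u) hl)
  · have hts : t <+: s :=
      List.prefix_of_prefix_length_le (List.prefix_append t u) hpre (by omega)
    have hne : t ≠ s := by
      intro he; rw [he] at hl; omega
    exact List.lt_asymm h (pv_prefix_lt t s hts hne)

lemma pvKids_path {d k : pvN} (hk : k ∈ pvKids d) : k.1 = d.1 ++ ['0'] ∨ k.1 = d.1 ++ ['1'] := by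
  simp only [pvKids, List.mem_cons] at hk
  rcases hk with rfl | rfl | h
  · exact Or.inl rfl
  · exact Or.inr rfl
  · exact absurd h (by simp)

lemma pvR_left_kid (p d k : pvN) (hk : k ∈ pvKids d) (h : pvR p d) : pvR p k := by
  rcases h with ⟨h1, h2⟩
  rcases pvKids_path hk with he | he <;> rw [pvR, he] <;>
    exact ⟨pv_lt_append_right _ _ _ h1, pv_not_prefix_append _ _ _ h1 h2⟩

lemma pvR_kid_right (d n k : pvN) (hk : k ∈ pvKids d) (h : pvR d n) : pvR k n := by
  rcases h with ⟨h1, h2⟩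
  rcases pvKids_path hk with he | he <;> rw [pvR, he] <;>
    refine ⟨pv_append_lt _ _ _ h1 h2, fun hpre => h2 ((List.prefix_append d.1 _).trans hpre)⟩

lemma pvR_kids (d : pvN) : (pvKids d).Pairwise pvR := by
  refine List.pairwise_cons.mpr ⟨?_, by simp⟩
  intro k hk
  simp only [List.mem_singleton] at hk
  subst hk
  refine ⟨pv_append_lt_append d.1, fun hpre => ?_⟩
  have := hpre.eq_of_length (by simp)
  simp at this

-- ---- key order facts ----
lemma pvKLt_iff (x y : Int × List Char × Int × Int) :
    pvKLt x y ↔ (x.1 < y.1 ∨ (x.1 = y.1 ∧ x.2.1 < y.2.1)) := by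
  simp [pvKLt, pvKeyLt]

lemma pvKLt_trans {x y z : Int × List Char × Int × Int} (h1 : pvKLt x y) (h2 : pvKLt y z) : pvKLt x z := by
  rw [pvKLt_iff] at *
  rcases h1 with h1 | ⟨e1, l1⟩ <;> rcases h2 with h2 | ⟨e2, l2⟩
  · exact Or.inl (lt_trans h1 h2)
  · exact Or.inl (e2 ▸ h1)
  · exact Or.inl (e1 ▸ h2)
  · exact Or.inr ⟨e1.trans e2, List.lt_trans l1 l2⟩

lemma pvKLt_total (x y : Int × List Char × Int × Int) (h : x.2.1 ≠ y.2.1) : pvCmp x y := by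
  unfold pvCmp
  rw [pvKLt_iff, pvKLt_iff]
  rcases lt_trichotomy x.1 y.1 with h1 | h1 | h1
  · exact Or.inl (Or.inl h1)
  · rcases lt_trichotomy (α := List Char) x.2.1 y.2.1 with h2 | h2 | h2
    · exact Or.inl (Or.inr ⟨h1, h2⟩)
    · exact absurd h2 h
    · exact Or.inr (Or.inr ⟨h1.symm, h2⟩)
  · exact Or.inr (Or.inl h1)

lemma pvCmp_symm {x y : Int × List Char × Int × Int} (h : pvCmp x y) : pvCmp y x := h.symm

-- ---- pvPush facts ----
lemma pvPush_perm (q : List (Int × List Char × Int × Int)) (it : Int × List Char × Int × Int) :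
    (pvPush q it).Perm (it :: q) := by
  induction q with
  | nil => simp [pvPush]
  | cons a t ih =>
      by_cases h : pvKeyLt (a.1, a.2.1) (it.1, it.2.1)
      · simpa [pvPush, h] using ((ih.cons a).trans (List.Perm.swap it a t))
      · simp [pvPush, h]

lemma pvPush_mem {q : List (Int × List Char × Int × Int)} {it x : Int × List Char × Int × Int}
    (h : x ∈ pvPush q it) : x = it ∨ x ∈ q :=
  List.mem_cons.mp ((pvPush_perm q it).mem_iff.mp h)

lemma pvPush_pairwise (q : List (Int × List Char × Int × Int)) (it : Int × List Char × Int × Int)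
    (hq : q.Pairwise pvKLt) (hc : ∀ x ∈ q, pvCmp it x) : (pvPush q it).Pairwise pvKLt := by
  induction q with
  | nil => simp [pvPush, List.pairwise_cons]
  | cons a t ih =>
      rcases List.pairwise_cons.mp hq with ⟨ha, ht⟩
      by_cases h : pvKeyLt (a.1, a.2.1) (it.1, it.2.1)
      · rw [show pvPush (a :: t) it = a :: pvPush t it from by simp [pvPush, h]]
        refine List.pairwise_cons.mpr ⟨?_, ih ht (fun x hx => hc x (by simp [hx]))⟩
        intro y hy
        rcases pvPush_mem hy with rfl | hy
        · exact h
        · exact ha y hy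
      · rw [show pvPush (a :: t) it = it :: a :: t from by simp [pvPush, h]]
        have hia : pvKLt it a := (hc a (by simp)).resolve_right h
        refine List.pairwise_cons.mpr ⟨?_, hq⟩
        intro y hy
        rcases List.mem_cons.mp hy with rfl | hy
        · exact hia
        · rcases hc y (by simp [hy]) with h1 | h1
          · exact h1
          · exact absurd (pvKLt_trans (ha y hy) h1) h

-- ---- running-max facts (over interval lists) ----
def pvMsz (xs : List (Int × Int)) (a : Int) : Int := xs.foldl (fun m c => max m (c.2 - c.1)) a

lemma pvMsz_le (xs : List (Int × Int)) : ∀ a, a ≤ pvMsz xs a := by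
  induction xs with
  | nil => intro a; exact le_refl a
  | cons c t ih => intro a; exact le_trans (le_max_left _ _) (ih _)

lemma pvMsz_mem_le (xs : List (Int × Int)) : ∀ a, ∀ c ∈ xs, c.2 - c.1 ≤ pvMsz xs a := by
  induction xs with
  | nil => simp
  | cons x t ih =>
      intro a c hc
      rcases List.mem_cons.mp hc with rfl | hc
      · exact le_trans (le_max_right _ _) (pvMsz_le t _)
      · exact ih _ c hc

lemma pvMsz_const (xs : List (Int × Int)) : ∀ a, (∀ c ∈ xs, c.2 - c.1 ≤ a) → pvMsz xs a = a := by
  induction xs with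
  | nil => intro a _; rfl
  | cons x t ih =>
      intro a h
      have hx : max a (x.2 - x.1) = a := max_eq_left (h x (by simp))
      have h2 : pvMsz (x :: t) a = pvMsz t (max a (x.2 - x.1)) := rfl
      rw [h2, hx]
      exact ih a (fun c hc => h c (by simp [hc]))

lemma pvMsz_attained (xs : List (Int × Int)) : ∀ a, a < pvMsz xs a →
    ∃ c ∈ xs, c.2 - c.1 = pvMsz xs a := by
  induction xs with
  | nil => intro a h; exact absurd h (lt_irrefl a)
  | cons x t ih =>
      intro a h
      by_cases hx : x.2 - x.1 ≤ a
      · have he : max a (x.2 - x.1) = a := max_eq_left hx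
        have h' : a < pvMsz t a := by
          have h2 : pvMsz (x :: t) a = pvMsz t (max a (x.2 - x.1)) := rfl
          rw [h2, he] at h; exact h
        rcases ih a h' with ⟨c, hc, hce⟩
        refine ⟨c, by simp [hc], ?_⟩
        have h2 : pvMsz (x :: t) a = pvMsz t (max a (x.2 - x.1)) := rfl
        rw [h2, he]; exact hce
      · have hgt : a < x.2 - x.1 := by omega
        have he : max a (x.2 - x.1) = x.2 - x.1 := max_eq_right (le_of_lt hgt)
        have hrw : pvMsz (x :: t) a = pvMsz t (x.2 - x.1) := by
          have h2 : pvMsz (x :: t) a = pvMsz t (max a (x.2 - x.1)) := rfl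
          rw [h2, he]
        rw [hrw] at h ⊢
        by_cases ht : x.2 - x.1 < pvMsz t (x.2 - x.1)
        · rcases ih _ ht with ⟨c, hc, hce⟩
          exact ⟨c, by simp [hc], hce⟩
        · have := pvMsz_le t (x.2 - x.1)
          exact ⟨x, by simp, le_antisymm this (by omega)⟩

lemma pvMax_eq_msz (D : List pvN) : pvMax D = pvMsz (D.map pvProj) (-1) := by
  rw [pvMax, pvMsz, List.foldl_map]
  rfl

lemma pvSz_le_max (D : List pvN) (d : pvN) (hd : d ∈ D) : pvSz d ≤ pvMax D := by
  rw [pvMax_eq_msz]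
  exact pvMsz_mem_le (D.map pvProj) (-1) (pvProj d) (List.mem_map_of_mem hd)

lemma pvMax_nonneg (D : List pvN) (h : ∃ d ∈ D, 0 ≤ pvSz d) : 0 ≤ pvMax D := by
  rcases h with ⟨d, hd, h0⟩
  exact le_trans h0 (pvSz_le_max D d hd)

lemma pvMax_attained (D : List pvN) (h : ∃ d ∈ D, 0 ≤ pvSz d) : ∃ d ∈ D, pvSz d = pvMax D := by
  have hm : (-1 : Int) < pvMax D := lt_of_lt_of_le (by norm_num) (pvMax_nonneg D h)
  rw [pvMax_eq_msz] at hm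
  rcases pvMsz_attained (D.map pvProj) (-1) hm with ⟨c, hc, hce⟩
  rcases List.mem_map.mp hc with ⟨d, hd, rfl⟩
  refine ⟨d, hd, ?_⟩
  rw [pvMax_eq_msz]
  exact hce

lemma pvIdx_lt (D : List pvN) (h : ∃ d ∈ D, 0 ≤ pvSz d) : pvIdx D < D.length := by
  apply List.findIdx_lt_length.mpr
  rcases pvMax_attained D h with ⟨d, hd, he⟩
  exact ⟨d, hd, by simpa using he⟩

lemma pvIdx_sz (D : List pvN) (h : ∃ d ∈ D, 0 ≤ pvSz d) :
    pvSz (D[pvIdx D]'(pvIdx_lt D h)) = pvMax D := by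
  have := List.findIdx_getElem (p := fun d => pvSz d == pvMax D) (xs := D) (w := pvIdx_lt D h)
  simpa using this

-- ---- the A-side scan ----
def pvGo (xs : List (Int × Int)) (j : Nat) (acc : Int × Int) : Int × Int :=
  match xs with
  | [] => acc
  | c :: rest => pvGo rest (j + 1) (if c.2 - c.1 > acc.2 then ((j : Int), c.2 - c.1) else acc)

lemma pvGo_foldl (full : List (Int × Int)) :
    ∀ (xs : List (Int × Int)) (j : Nat) (acc : Int × Int), full.drop j = xs →
    (PySem.List.pyRange (j : Int) (full.length : Int) 1).foldl
      (fun (acc : Int × Int) i =>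
        if (PySem.List.pyGetD full i (0, 0)).2 - (PySem.List.pyGetD full i (0, 0)).1 > acc.2
        then (i, (PySem.List.pyGetD full i (0, 0)).2 - (PySem.List.pyGetD full i (0, 0)).1)
        else acc) acc = pvGo xs j acc := by
  intro xs
  induction xs with
  | nil =>
      intro j acc hd
      have hj : full.length ≤ j := List.drop_eq_nil_iff.mp hd
      rw [PySem.List.pyRange_one_eq_nil (by exact_mod_cast hj)]
      rfl
  | cons c rest ih =>
      intro j acc hd
      have hj : j < full.length := by
        by_contra hc
        rw [List.drop_eq_nil_iff.mpr (by omega)] at hd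
        exact absurd hd (by simp)
      have hdc : full.drop j = full[j] :: full.drop (j + 1) := List.drop_eq_getElem_cons hj
      rw [hd] at hdc
      have hcj : full[j] = c := (List.cons.injEq _ _ _ _ ▸ hdc.symm).1
      have hrest : full.drop (j + 1) = rest := (List.cons.injEq _ _ _ _ ▸ hdc.symm).2
      rw [PySem.List.pyRange_one_cons (by exact_mod_cast hj), List.foldl_cons]
      have hget : PySem.List.pyGetD full ((j : Nat) : Int) ((0 : Int), (0 : Int)) = c := by
        rw [PySem.List.pyGetD_natCast, List.getD_eq_getElem full _ hj, hcj]
      rw [hget]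
      have hcast : ((j : Nat) : Int) + 1 = (((j + 1 : Nat)) : Int) := by push_cast; ring
      rw [hcast, ih (j + 1) _ hrest]
      rfl

lemma pvGo_skip (xs : List (Int × Int)) : ∀ (j : Nat) (acc : Int × Int),
    (∀ c ∈ xs, c.2 - c.1 ≤ acc.2) → pvGo xs j acc = acc := by
  induction xs with
  | nil => intro j acc _; rfl
  | cons c rest ih =>
      intro j acc h
      have hc : ¬ (c.2 - c.1 > acc.2) := not_lt.mpr (h c (by simp))
      show pvGo rest (j + 1) _ = acc
      rw [if_neg hc]
      exact ih (j + 1) acc (fun x hx => h x (by simp [hx]))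

lemma pvGo_find : ∀ (xs : List (Int × Int)) (j : Nat) (acc : Int × Int),
    (∃ c ∈ xs, acc.2 < c.2 - c.1) →
    pvGo xs j acc =
      (((j : Int) + ((xs.findIdx (fun c => c.2 - c.1 == pvMsz xs acc.2)) : Int)), pvMsz xs acc.2) := by
  intro xs
  induction xs with
  | nil => intro j acc h; simp at h
  | cons c rest ih =>
      intro j acc hex
      have hstep : pvGo (c :: rest) j acc =
          pvGo rest (j + 1) (if c.2 - c.1 > acc.2 then ((j : Int), c.2 - c.1) else acc) := rfl
      by_cases hs : acc.2 < c.2 - c.1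
      · have hacc : (if c.2 - c.1 > acc.2 then ((j : Int), c.2 - c.1) else acc) = ((j : Int), c.2 - c.1) :=
          if_pos hs
        have hmeq : pvMsz (c :: rest) acc.2 = pvMsz rest (c.2 - c.1) := by
          have h2 : pvMsz (c :: rest) acc.2 = pvMsz rest (max acc.2 (c.2 - c.1)) := rfl
          rw [h2, max_eq_right (le_of_lt hs)]
        by_cases hr : ∃ c' ∈ rest, c.2 - c.1 < c'.2 - c'.1
        · have ihv := ih (j + 1) ((j : Int), c.2 - c.1) hr
          have hne : ¬ (c.2 - c.1 == pvMsz rest (c.2 - c.1)) = true := by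
            rcases hr with ⟨c', hc', hlt⟩
            have := pvMsz_mem_le rest (c.2 - c.1) c' hc'
            simp only [beq_iff_eq]
            omega
          rw [hstep, hacc, ihv, hmeq]
          rw [List.findIdx_cons]
          simp only [hne, cond_false, Prod.mk.injEq]
          refine ⟨?_, by trivial⟩
          push_cast; ring
        · have hall : ∀ c' ∈ rest, c'.2 - c'.1 ≤ c.2 - c.1 := by
            intro c' hc'
            by_contra hcc
            exact hr ⟨c', hc', by omega⟩
          have hskip := pvGo_skip rest (j + 1) ((j : Int), c.2 - c.1) hall
          have hconst : pvMsz rest (c.2 - c.1) = c.2 - c.1 := pvMsz_const rest _ hall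
          have hidx : (c :: rest).findIdx (fun c' => c'.2 - c'.1 == pvMsz (c :: rest) acc.2) = 0 := by
            rw [List.findIdx_cons]
            have : (c.2 - c.1 == pvMsz (c :: rest) acc.2) = true := by
              rw [hmeq, hconst]; simp
            simp [this]
          rw [hstep, hacc, hskip, hidx, hmeq, hconst]
          simp
      · have hacc : (if c.2 - c.1 > acc.2 then ((j : Int), c.2 - c.1) else acc) = acc := if_neg hs
        have hmeq : pvMsz (c :: rest) acc.2 = pvMsz rest acc.2 := by
          have h2 : pvMsz (c :: rest) acc.2 = pvMsz rest (max acc.2 (c.2 - c.1)) := rfl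
          rw [h2, max_eq_left (by omega)]
        have hr : ∃ c' ∈ rest, acc.2 < c'.2 - c'.1 := by
          rcases hex with ⟨c', hc', hlt⟩
          rcases List.mem_cons.mp hc' with rfl | hc'
          · omega
          · exact ⟨c', hc', hlt⟩
        have ihv := ih (j + 1) acc hr
        have hne : ¬ (c.2 - c.1 == pvMsz rest acc.2) = true := by
          rcases hr with ⟨c', hc', hlt⟩
          have := pvMsz_mem_le rest acc.2 c' hc'
          simp only [beq_iff_eq]
          omega
        rw [hstep, hacc, ihv, hmeq, List.findIdx_cons]
        simp only [hne, cond_false, Prod.mk.injEq]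
        refine ⟨?_, by trivial⟩
        push_cast; ring

lemma pvGo_foldl0 (full : List (Int × Int)) (acc : Int × Int) :
    (PySem.List.pyRange 0 (full.length : Int) 1).foldl
      (fun (acc : Int × Int) i =>
        if (PySem.List.pyGetD full i (0, 0)).2 - (PySem.List.pyGetD full i (0, 0)).1 > acc.2
        then (i, (PySem.List.pyGetD full i (0, 0)).2 - (PySem.List.pyGetD full i (0, 0)).1)
        else acc) acc = pvGo full 0 acc := by
  have h := pvGo_foldl full full 0 acc (by simp)
  simpa using h

lemma pvGo_spec (D : List pvN) (hinv : pvInv D) :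
    pvGo (D.map pvProj) 0 (-1, -1) = ((pvIdx D : Int), pvMax D) := by
  rcases hinv with ⟨-, hex⟩
  have hex' : ∃ c ∈ D.map pvProj, ((-1 : Int), (-1 : Int)).2 < c.2 - c.1 := by
    rcases hex with ⟨d, hd, h0⟩
    refine ⟨pvProj d, List.mem_map_of_mem hd, ?_⟩
    show (-1 : Int) < (pvProj d).2 - (pvProj d).1
    have he : pvSz d = (pvProj d).2 - (pvProj d).1 := rfl
    omega
  rw [pvGo_find (D.map pvProj) 0 (-1, -1) hex']
  have hidx : (D.map pvProj).findIdx (fun c => c.2 - c.1 == pvMsz (D.map pvProj) (-1, -1).2) = pvIdx D := by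
    rw [List.findIdx_map]
    show D.findIdx ((fun c => c.2 - c.1 == pvMsz (D.map pvProj) (-1)) ∘ pvProj) = _
    rw [pvIdx]
    congr 1
    funext d
    show (pvSz d == pvMsz (D.map pvProj) (-1)) = (pvSz d == pvMax D)
    rw [← pvMax_eq_msz]
  rw [hidx, ← pvMax_eq_msz]
  simp

-- int(m / 2) agrees with m // 2 on m ≥ 0
lemma pv_tdiv2 (m : Int) (h : 0 ≤ m) : Int.tdiv m 2 = PySem.Int.floordiv m 2 := by
  rw [Int.tdiv_eq_ediv, if_pos (Or.inl h), PySem.Int.floordiv_eq_ediv_of_pos (by norm_num)]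
  ring

-- ---- the A step ----
lemma pvStepA_eq (D : List pvN) (h : pvInv D) : pvStepA (D.map pvProj) = (pvRef D).map pvProj := by
  have hex := h.2
  have hi : pvIdx D < D.length := pvIdx_lt D hex
  have hm0 : 0 ≤ pvMax D := pvMax_nonneg D hex
  have hdm : pvSz (D[pvIdx D]'hi) = pvMax D := pvIdx_sz D hex
  set i := pvIdx D with hidef
  set d := D[i]'hi with hddef
  set m := pvMax D with hmdef
  have hlen : (D.map pvProj).length = D.length := List.length_map _
  have hilen : i < (D.map pvProj).length := by omega
  have hget : PySem.List.pyGetD (D.map pvProj) ((i : Nat) : Int) ((0 : Int), (0 : Int)) = pvProj d := by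
    rw [PySem.List.pyGetD_natCast, List.getD_eq_getElem _ _ hilen, List.getElem_map]
  simp only [pvStepA]
  rw [pvGo_foldl0, pvGo_spec D h, ← hidef, ← hmdef]
  rw [hget]
  rw [PySem.List.pySetD_natCast]
  set v : Int × Int := ((pvProj d).1, (pvProj d).1 + Int.tdiv m 2) with hvdef
  have hget2 : PySem.List.pyGetD ((D.map pvProj).set i v) ((i : Nat) : Int) ((0 : Int), (0 : Int)) = v := by
    rw [PySem.List.pyGetD_natCast, List.getD_eq_getElem _ _ (by rw [List.length_set]; omega),
      List.getElem_set_self]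
  rw [hget2]
  have hcast : ((i : Nat) : Int) + 1 = (((i + 1 : Nat)) : Int) := by push_cast; ring
  rw [hcast, PySem.List.insert_natCast _ _ _ (by rw [List.length_set]; omega)]
  -- both sides as take/drop around position i
  have hsetd : (D.map pvProj).set i v =
      (D.map pvProj).take i ++ v :: (D.map pvProj).drop (i + 1) :=
    List.set_eq_take_cons_drop v hilen
  have htklen : ((D.map pvProj).take i).length = i := by
    rw [List.length_take]; omega
  have hsub1 : i + 1 - i = 1 := by omega
  have htk : ((D.map pvProj).set i v).take (i + 1) = (D.map pvProj).take i ++ [v] := by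
    rw [hsetd, List.take_append,
      List.take_of_length_le (by omega : ((D.map pvProj).take i).length ≤ i + 1), htklen, hsub1]
    rfl
  have hdr : ((D.map pvProj).set i v).drop (i + 1) = (D.map pvProj).drop (i + 1) := by
    rw [hsetd, List.drop_append,
      List.drop_eq_nil_iff.mpr (by omega : ((D.map pvProj).take i).length ≤ i + 1), htklen, hsub1]
    rfl
  rw [htk, hdr]
  -- the reference side
  have hgetD : D.getD i ([], 0, 0) = d := List.getD_eq_getElem D _ hi
  rw [pvRef, ← hidef, hgetD]
  have hdiv : Int.tdiv m 2 = PySem.Int.floordiv (pvSz d) 2 := by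
    rw [hdm]
    exact pv_tdiv2 m hm0
  have hkids : (pvKids d).map pvProj = [v, (v.2 + 1, (pvProj d).2)] := by
    simp only [pvKids, List.map_cons, List.map_nil]
    rw [hvdef]
    simp only [pvProj, hdiv]
  rw [List.map_append, List.map_append, hkids, List.map_take, List.map_drop]
  simp

-- ---- invariant preservation ----
lemma pvInv_ref (D : List pvN) (h : pvInv D) : pvInv (pvRef D) := by
  have hex := h.2
  have hi : pvIdx D < D.length := pvIdx_lt D hex
  have hm0 : 0 ≤ pvMax D := pvMax_nonneg D hex
  have hdm : pvSz (D[pvIdx D]'hi) = pvMax D := pvIdx_sz D hex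
  set i := pvIdx D with hidef
  set d := D[i]'hi with hddef
  have hgetD : D.getD i ([], 0, 0) = d := List.getD_eq_getElem D _ hi
  have hsplit : D = D.take i ++ d :: D.drop (i + 1) := by
    conv_lhs => rw [← List.take_append_drop i D, List.drop_eq_getElem_cons hi]
  have hPW : (D.take i ++ d :: D.drop (i + 1)).Pairwise pvR := hsplit ▸ h.1
  rcases List.pairwise_append.mp hPW with ⟨h1, h2, hcross⟩
  rcases List.pairwise_cons.mp h2 with ⟨hd, h3⟩
  constructor
  · rw [pvRef, ← hidef, hgetD, List.append_assoc]
    rw [List.pairwise_append]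
    refine ⟨h1, ?_, ?_⟩
    · rw [List.pairwise_append]
      refine ⟨pvR_kids d, h3, ?_⟩
      intro k hk y hy
      exact pvR_kid_right d y k hk (hd y hy)
    · intro x hx y hy
      rcases List.mem_append.mp hy with hy | hy
      · exact pvR_left_kid x d y hy (hcross x hx d (by simp))
      · exact hcross x hx y (by simp [hy])
  · refine ⟨(d.1 ++ ['0'], d.2.1, d.2.1 + PySem.Int.floordiv (pvSz d) 2), ?_, ?_⟩
    · rw [pvRef, ← hidef, hgetD]
      simp [pvKids]
    · show 0 ≤ d.2.1 + PySem.Int.floordiv (pvSz d) 2 - d.2.1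
      have : 0 ≤ PySem.Int.floordiv (pvSz d) 2 := by
        rw [PySem.Int.floordiv_eq_ediv_of_pos (by norm_num)]
        exact Int.ediv_nonneg (by rw [hdm]; exact hm0) (by norm_num)
      omega

-- ---- the B step ----
lemma pvStepB_cons (negsz : Int) (path : List Char) (a b : Int)
    (rest : List (Int × List Char × Int × Int)) :
    pvStepB ((negsz, path, a, b) :: rest) =
      pvPush (pvPush rest (a - (a + PySem.Int.floordiv (-negsz) 2), path ++ ['0'], a,
          a + PySem.Int.floordiv (-negsz) 2))
        ((a + PySem.Int.floordiv (-negsz) 2) + 1 - b, path ++ ['1'],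
          (a + PySem.Int.floordiv (-negsz) 2) + 1, b) := rfl

lemma pvStepB_eq (D : List pvN) (q : List (Int × List Char × Int × Int))
    (h : pvInv D) (hr : pvRel D q) : pvRel (pvRef D) (pvStepB q) := by
  have hex := h.2
  have hi : pvIdx D < D.length := pvIdx_lt D hex
  have hm0 : 0 ≤ pvMax D := pvMax_nonneg D hex
  have hdm : pvSz (D[pvIdx D]'hi) = pvMax D := pvIdx_sz D hex
  set i := pvIdx D with hidef
  set d := D[i]'hi with hddef
  have hgetD : D.getD i ([], 0, 0) = d := List.getD_eq_getElem D _ hi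
  have hsplit : D = D.take i ++ d :: D.drop (i + 1) := by
    conv_lhs => rw [← List.take_append_drop i D, List.drop_eq_getElem_cons hi]
  have hmapsplit : D.map pvDec = (D.take i).map pvDec ++ pvDec d :: (D.drop (i + 1)).map pvDec := by
    conv_lhs => rw [hsplit]
    simp
  -- q is nonempty
  have hqne : q ≠ [] := by
    intro h0
    rw [h0] at hr
    have h1 : D.map pvDec = [] := hr.1.symm.eq_nil
    have h2 : D = [] := by simpa using h1
    rw [h2] at hi
    simp at hi
  obtain ⟨h0, qt, hq⟩ := List.exists_cons_of_ne_nil hqne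
  -- the head of q is the decorated chosen node
  have hdmem : pvDec d ∈ q := hr.1.symm.subset (List.mem_map_of_mem (hddef ▸ List.getElem_mem hi))
  have hhead : h0 = pvDec d := by
    by_contra hne
    have hdt : pvDec d ∈ qt := by
      rcases List.mem_cons.mp (hq ▸ hdmem) with he | ht
      · exact absurd he.symm hne
      · exact ht
    have hklt : pvKLt h0 (pvDec d) := (List.pairwise_cons.mp (hq ▸ hr.2)).1 _ hdt
    have h0mem : h0 ∈ D.map pvDec := hr.1.subset (hq ▸ List.mem_cons_self)
    rcases List.mem_map.mp h0mem with ⟨x, hx, hxe⟩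
    rcases List.mem_iff_getElem.mp hx with ⟨j, hj, hje⟩
    rw [← hxe] at hklt
    rcases (pvKLt_iff _ _).mp hklt with hlt | ⟨heq, hplt⟩
    · have hle : pvSz x ≤ pvMax D := pvSz_le_max D x hx
      have h2 : x.2.1 - x.2.2 < d.2.1 - d.2.2 := hlt
      have hszd : pvSz d = pvMax D := hdm
      rw [pvSz] at hle hszd
      omega
    · have hszx : pvSz x = pvMax D := by
        have h2 : x.2.1 - x.2.2 = d.2.1 - d.2.2 := heq
        have hszd : pvSz d = pvMax D := hdm
        rw [pvSz] at hszd ⊢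
        omega
      have hplt' : x.1 < d.1 := hplt
      rcases lt_trichotomy j i with hji | hji | hji
      · have hfidx : pvIdx D = List.findIdx (fun d => pvSz d == pvMax D) D := rfl
        have hji' : j < List.findIdx (fun d => pvSz d == pvMax D) D := by omega
        have hfalse := List.not_of_lt_findIdx (p := fun d => pvSz d == pvMax D) (xs := D) hji'
        have htrue : (pvSz (D[j]'hj) == pvMax D) = true := by rw [hje]; simp [hszx]
        have hfalse' : ¬ (pvSz (D[j]'hj) == pvMax D) = true := by simpa using hfalse
        exact hfalse' htrue
      · apply hne
        rw [← hxe]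
        have hxd : x = d := by
          subst hji
          exact hje.symm.trans hddef.symm
        rw [hxd]
      · have h2 := List.pairwise_iff_getElem.mp h.1 i j hi hj hji
        have h3 : pvR d (D[j]'hj) := h2
        rw [hje] at h3
        exact List.lt_asymm hplt' h3.1
  -- the tail of q is a permutation of the other decorated nodes
  have hq1 : (pvDec d :: qt).Perm (D.map pvDec) := by
    rw [← hhead, ← hq]
    exact hr.1
  have hq2 : (D.map pvDec).Perm
      (pvDec d :: ((D.take i).map pvDec ++ (D.drop (i + 1)).map pvDec)) := by
    rw [hmapsplit]
    exact List.perm_middle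
  have hqt : qt.Perm ((D.take i).map pvDec ++ (D.drop (i + 1)).map pvDec) :=
    (hq1.trans hq2).cons_inv
  -- name the two children
  set hdiv := PySem.Int.floordiv (pvSz d) 2 with hdivdef
  set c0 : pvN := (d.1 ++ ['0'], d.2.1, d.2.1 + hdiv) with hc0def
  set c1 : pvN := (d.1 ++ ['1'], d.2.1 + hdiv + 1, d.2.2) with hc1def
  have hkids : pvKids d = [c0, c1] := by rw [pvKids]
  -- compute the step
  have hstep : pvStepB q = pvPush (pvPush qt (pvDec c0)) (pvDec c1) := by
    rw [hq, hhead]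
    show pvStepB ((d.2.1 - d.2.2, d.1, d.2.1, d.2.2) :: qt) = _
    rw [pvStepB_cons]
    have hneg : -(d.2.1 - d.2.2) = pvSz d := by rw [pvSz]; ring
    rw [hneg]
    rfl
  -- the decorated reference list
  have hmapref : (pvRef D).map pvDec =
      (D.take i).map pvDec ++ pvDec c0 :: pvDec c1 :: (D.drop (i + 1)).map pvDec := by
    rw [pvRef, ← hidef, hgetD, hkids]
    simp
  set TD := (D.take i).map pvDec ++ (D.drop (i + 1)).map pvDec with hTDdef
  have t1 : ((pvRef D).map pvDec).Perm (pvDec c0 :: pvDec c1 :: TD) := by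
    rw [hmapref, hTDdef]
    exact List.perm_middle.trans ((List.perm_middle (l₁ := (D.take i).map pvDec)).cons (pvDec c0))
  -- comparability of all decorated nodes of the reference list
  have hrefInv := pvInv_ref D h
  have hCmpRef : ((pvRef D).map pvDec).Pairwise pvCmp := by
    refine List.Pairwise.map pvDec ?_ hrefInv.1
    intro a b hab
    apply pvKLt_total
    show a.1 ≠ b.1
    intro he
    exact List.lt_asymm hab.1 (he ▸ hab.1)
  have hCmp2 : (pvDec c0 :: pvDec c1 :: TD).Pairwise pvCmp :=
    (t1.pairwise_iff (fun h => pvCmp_symm h)).mp hCmpRef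
  rcases List.pairwise_cons.mp hCmp2 with ⟨hA, hCmp3⟩
  rcases List.pairwise_cons.mp hCmp3 with ⟨hB, -⟩
  have hqtPW : qt.Pairwise pvKLt := (List.pairwise_cons.mp (hq ▸ hr.2)).2
  have hmemTD : ∀ x ∈ qt, x ∈ TD := fun x hx => hqt.subset hx
  -- assemble
  rw [hstep]
  constructor
  · -- permutation
    have p1 : (pvPush qt (pvDec c0)).Perm (pvDec c0 :: qt) := pvPush_perm qt (pvDec c0)
    have p2 : (pvPush (pvPush qt (pvDec c0)) (pvDec c1)).Perm (pvDec c1 :: pvPush qt (pvDec c0)) :=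
      pvPush_perm _ (pvDec c1)
    have p3 : (pvPush (pvPush qt (pvDec c0)) (pvDec c1)).Perm (pvDec c0 :: pvDec c1 :: TD) :=
      (p2.trans ((p1.cons _).trans (((hqt.cons _).cons _).trans (List.Perm.swap _ _ _))))
    exact p3.trans t1.symm
  · -- sortedness
    have hpush1 : (pvPush qt (pvDec c0)).Pairwise pvKLt := by
      apply pvPush_pairwise qt (pvDec c0) hqtPW
      intro x hx
      exact hA x (by simp [hmemTD x hx])
    apply pvPush_pairwise _ (pvDec c1) hpush1
    intro x hx
    rcases pvPush_mem hx with rfl | hx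
    · exact pvCmp_symm (hA (pvDec c1) (by simp))
    · exact hB x (hmemTD x hx)

-- ---- the loop ----
lemma pvLoop (l : List Int) : ∀ (D : List pvN) (q : List (Int × List Char × Int × Int)),
    pvInv D → pvRel D q →
    ∃ D', pvInv D' ∧ l.foldl (fun c _ => pvStepA c) (D.map pvProj) = D'.map pvProj ∧
      pvRel D' (l.foldl (fun q _ => pvStepB q) q) := by
  induction l with
  | nil => intro D q h hr; exact ⟨D, h, rfl, hr⟩
  | cons a t ih =>
      intro D q h hr
      have h' := pvInv_ref D h
      have hr' := pvStepB_eq D q h hr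
      rcases ih (pvRef D) (pvStepB q) h' hr' with ⟨D', hD', he, hq'⟩
      exact ⟨D', hD', by simpa [pvStepA_eq D h] using he, hq'⟩

-- ---- the final sort ----
lemma pvFinal (D : List pvN) (q : List (Int × List Char × Int × Int))
    (h : pvInv D) (hr : pvRel D q) :
    (@PySem.List.sorted _ (List Char) pvPathLT pvPathDec q (fun e => e.2.1) false).map
      (fun e => (e.2.2.1, e.2.2.2)) = D.map pvProj := by
  have hs : @PySem.List.sorted _ (List Char) pvPathLT pvPathDec q (fun e => e.2.1) false =
      D.map pvDec := by
    refine @PySem.List.sorted_eq_of_perm_of_pairwise_lt _ (List Char) pvPathLO q (D.map pvDec)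
      (fun e => e.2.1) hr.1.symm ?_
    refine List.Pairwise.map pvDec ?_ h.1
    intro a b hab
    exact hab.1
  rw [hs, List.map_map]
  rfl

-- ---- initial state ----
lemma pvInit (lower upper : Int) :
    pvInv [(['0'], lower, lower), (['1'], 1, upper)] ∧
    pvRel [(['0'], lower, lower), (['1'], 1, upper)]
      (pvPush (pvPush [] (0, ['0'], lower, lower)) (1 - upper, ['1'], 1, upper)) := by
  have hd1 : pvDec (['0'], lower, lower) = ((0 : Int), ['0'], lower, lower) := by
    simp [pvDec]
  have hd2 : pvDec (['1'], 1, upper) = (1 - upper, ['1'], 1, upper) := by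
    simp [pvDec]
  refine ⟨⟨?_, ⟨(['0'], lower, lower), by simp, by simp [pvSz]⟩⟩, ?_, ?_⟩
  · refine List.pairwise_cons.mpr ⟨?_, by simp⟩
    intro y hy
    rcases List.mem_singleton.mp hy with rfl
    exact ⟨show (['0'] : List Char) < ['1'] by decide,
      show ¬ (['0'] : List Char) <+: ['1'] by decide⟩
  · have hp : (pvPush (pvPush [] (0, ['0'], lower, lower)) (1 - upper, ['1'], 1, upper)).Perm
        ((1 - upper, ['1'], 1, upper) :: [((0 : Int), ['0'], lower, lower)]) := by
      have : pvPush ([] : List (Int × List Char × Int × Int)) (0, ['0'], lower, lower) =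
          [((0 : Int), ['0'], lower, lower)] := rfl
      rw [this]
      exact pvPush_perm _ _
    refine hp.trans ?_
    rw [List.map_cons, List.map_cons, List.map_nil, hd1, hd2]
    exact List.Perm.swap _ _ _
  · have : pvPush ([] : List (Int × List Char × Int × Int)) (0, ['0'], lower, lower) =
        [((0 : Int), ['0'], lower, lower)] := rfl
    rw [this]
    apply pvPush_pairwise _ _ (by simp [List.pairwise_cons])
    intro x hx
    rcases List.mem_singleton.mp hx with rfl
    apply pvKLt_total
    show (['1'] : List Char) ≠ ['0']
    decide

-- ===== VERDICT (by name: the statement is the Claim_ definition above) =====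
theorem special_example_split_largest_into_halves_spec : Claim_equal_special_example_split_largest_into_halves := by
  intro lower upper num_splits _dom
  unfold Spec_special_example_split_largest_into_halves
  unfold special_example_split_largest_into_halves special_example_split_largest_into_halves_alt
  by_cases h : num_splits < 1
  · simp [h]
  · simp only [h, if_false]
    rcases pvInit lower upper with ⟨hinv, hrel⟩
    rcases pvLoop (PySem.List.pyRange 0 (num_splits - 1) 1) _ _ hinv hrel with ⟨D', hD', he, hq⟩
    have hmap : ([(lower, lower), (1, upper)] : List (Int × Int)) =
        ([(['0'], lower, lower), (['1'], 1, upper)] : List pvN).map pvProj := rfl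
    rw [hmap, he, ← pvFinal D' _ hD' hq]
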